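-- pv_equiv track=rewrite | github.com/AdeebIsmail/TicTacToe | fun_game.py | check_other_diagonal_down
-- ===== SOURCE A (Python) =====
-- def check_other_diagonal_down(game_board, count, r, c, player):
--     try:
--         if game_board[r][c] == player:
--             count += 1
--         else:
--             return count
--     except IndexError:
--         return count
--     return check_other_diagonal_down(game_board, count, r + 1, c - 1, player)
-- ===== SOURCE B (Python) =====
-- def check_other_diagonal_down(game_board, count, r, c, player):
--     # Two phases: first materialise the cells along the down-left diagonal
--     # (stopping at the first IndexError, with Python's negative-index
--     # wraparound intact), then add the length of the leading run of cells
--     # equal to player.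
--     cells = []
--     while True:
--         try:
--             cells.append(game_board[r][c])
--         except IndexError:
--             break
--         r += 1
--         c -= 1
--     for cell in cells:
--         if cell != player:
--             break
--         count += 1
--     return count
-- ===== Notes on version B (the rewrite author's own statement) =====
-- stated objective: alternative
-- what changed: Replaced the recursion that threads the counter through each call by a two-phase iteration: an explicit loop first collects the diagonal cells until IndexError, then the length of the leading run equal to player is added to count.
import Mathlib
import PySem

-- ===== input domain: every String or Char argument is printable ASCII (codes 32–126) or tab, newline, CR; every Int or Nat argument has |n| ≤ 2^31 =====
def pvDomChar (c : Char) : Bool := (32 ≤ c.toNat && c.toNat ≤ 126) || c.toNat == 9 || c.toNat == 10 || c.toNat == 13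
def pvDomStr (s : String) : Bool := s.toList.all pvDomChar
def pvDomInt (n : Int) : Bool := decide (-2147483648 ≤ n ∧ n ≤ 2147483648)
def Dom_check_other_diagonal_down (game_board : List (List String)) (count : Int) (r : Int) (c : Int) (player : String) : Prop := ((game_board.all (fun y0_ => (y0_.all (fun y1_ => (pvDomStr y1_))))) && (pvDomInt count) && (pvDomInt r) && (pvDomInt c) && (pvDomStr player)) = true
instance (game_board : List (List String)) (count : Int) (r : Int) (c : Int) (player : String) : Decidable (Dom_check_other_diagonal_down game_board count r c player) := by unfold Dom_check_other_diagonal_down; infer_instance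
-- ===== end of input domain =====

-- B replaces A's counter-threading recursion by a two-phase iteration (collect the
-- diagonal cells, then add the leading run equal to player); alternative, not faster.


-- needed by both ports' termination proofs: a successful indexed read bounds the index
theorem pv_lt_of_pyGet?_some {α : Type} (xs : List α) (i : Int) (x : α)
    (h : PySem.List.pyGet? xs i = some x) : i < xs.length := by
  by_contra hc
  have hnone : PySem.List.pyGet? xs i = none := by
    rw [PySem.List.pyGet?_eq_none_iff]
    simp [PySem.Raise.InRange]
    omega
  simp [hnone] at h

-- ===== PORT A =====
-- game_board[r][c] is read with Python semantics (negative wraparound, none = IndexError)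
def check_other_diagonal_down (game_board : List (List String)) (count : Int) (r : Int) (c : Int) (player : String) : Int :=
  match hrow : PySem.List.pyGet? game_board r with
  | none => count                       -- IndexError on game_board[r]
  | some row =>
    match PySem.List.pyGet? row c with
    | none => count                     -- IndexError on row[c]
    | some cell =>
      if cell == player then
        check_other_diagonal_down game_board (count + 1) (r + 1) (c - 1) player
      else
        count
termination_by (game_board.length - r).toNat
decreasing_by
  have := pv_lt_of_pyGet?_some game_board r row hrow
  omega

-- ===== PORT B =====
-- phase 1 of Source B: the while-True loop collecting cells until the first IndexError
def pvCollectDiag (game_board : List (List String)) (r : Int) (c : Int) : List String :=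
  match hrow : PySem.List.pyGet? game_board r with
  | none => []
  | some row =>
    match PySem.List.pyGet? row c with
    | none => []
    | some cell => cell :: pvCollectDiag game_board (r + 1) (c - 1)
termination_by (game_board.length - r).toNat
decreasing_by
  have := pv_lt_of_pyGet?_some game_board r row hrow
  omega

-- phase 2 of Source B: the for-loop counting the leading run equal to player
def pvLeadingRun (cells : List String) (player : String) : Int :=
  match cells with
  | [] => 0
  | cell :: rest => if cell == player then 1 + pvLeadingRun rest player else 0

def check_other_diagonal_down_alt (game_board : List (List String)) (count : Int) (r : Int) (c : Int) (player : String) : Int :=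
  count + pvLeadingRun (pvCollectDiag game_board r c) player

-- ===== PRECONDITION & SPEC =====
def Spec_check_other_diagonal_down (game_board : List (List String)) (count : Int) (r : Int) (c : Int) (player : String) (out : Int) : Prop := out = check_other_diagonal_down_alt game_board count r c player
instance (game_board : List (List String)) (count : Int) (r : Int) (c : Int) (player : String) (out : Int) : Decidable (Spec_check_other_diagonal_down game_board count r c player out) := by unfold Spec_check_other_diagonal_down; infer_instance

-- ===== CLAIM (what is proved, stated in full; the proofs are below) =====
def Claim_equal_check_other_diagonal_down : Prop := ∀ (game_board : List (List String)) (count : Int) (r : Int) (c : Int) (player : String), Dom_check_other_diagonal_down game_board count r c player → Spec_check_other_diagonal_down game_board count r c player (check_other_diagonal_down game_board count r c player)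

-- ===== LEMMAS AND PROOFS =====
theorem check_eq_count_add_run (game_board : List (List String)) (count : Int) (r : Int) (c : Int) (player : String) :
    check_other_diagonal_down game_board count r c player
      = count + pvLeadingRun (pvCollectDiag game_board r c) player := by
  fun_induction check_other_diagonal_down game_board count r c player with
  | case1 count r c hrow =>
      rw [pvCollectDiag]
      split <;> simp_all [pvLeadingRun]
  | case2 count r c row hrow hcell =>
      rw [pvCollectDiag]
      split <;> simp_all [pvLeadingRun]
  | case3 count r c row hrow cell hcell hp ih =>
      rw [pvCollectDiag]
      split <;> simp_all [pvLeadingRun] <;> omega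
  | case4 count r c row hrow cell hcell hp =>
      rw [pvCollectDiag]
      split <;> simp_all [pvLeadingRun]
-- ===== VERDICT (by name: the statement is the Claim_ definition above) =====
theorem check_other_diagonal_down_spec : Claim_equal_check_other_diagonal_down := by
  intro game_board count r c player _
  unfold Spec_check_other_diagonal_down check_other_diagonal_down_alt
  exact check_eq_count_add_run game_board count r c player
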